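-- pv_equiv track=rewrite | github.com/babysowmya/codemind-python | lastSeenElement.py | lastSeenElement
-- ===== SOURCE A (Python) =====
-- def lastSeenElement(arr):
--     s = set()
--     c = []
--     for i in range(len(arr)-1,-1,-1):
--         if arr[i] not in s:
--             s.add(arr[i])
--             c.append(arr[i])
--     return c[-1]
-- ===== SOURCE B (Python) =====
-- def lastSeenElement(arr):
--     # first element (scanning forward) that never occurs again:
--     # its last occurrence has the smallest index of all last occurrences
--     for i, x in enumerate(arr):
--         if x not in arr[i + 1:]:
--             return x
-- ===== Notes on version B (the rewrite author's own statement) =====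
-- stated objective: simpler
-- what changed: Replaces A's backward index scan that builds a seen-set plus an appended list and returns its last entry by a forward enumerate scan that returns the first element not occurring in the rest of the array.
-- outside the precondition, e.g. on lastSeenElement([]): A raises IndexError, B returns None
import Mathlib
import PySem

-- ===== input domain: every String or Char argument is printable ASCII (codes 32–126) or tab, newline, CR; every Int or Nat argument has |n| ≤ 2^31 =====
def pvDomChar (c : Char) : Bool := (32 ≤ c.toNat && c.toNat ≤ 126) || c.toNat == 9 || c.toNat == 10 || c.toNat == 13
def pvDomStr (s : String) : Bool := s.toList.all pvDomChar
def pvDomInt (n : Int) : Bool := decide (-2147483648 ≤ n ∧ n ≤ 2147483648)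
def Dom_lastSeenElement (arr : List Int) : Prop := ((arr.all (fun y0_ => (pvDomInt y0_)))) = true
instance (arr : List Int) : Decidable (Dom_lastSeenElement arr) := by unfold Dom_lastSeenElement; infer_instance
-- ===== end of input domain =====

-- B replaces A's backward scan with set+list by a forward scan returning the first
-- element absent from the rest of the array (objective: simpler).

-- ===== PORT A =====
def lastSeenElement (arr : List Int) : Int :=
  let st := (PySem.List.pyRange ((arr.length : Int) - 1) (-1) (-1)).foldl
    (fun (sc : PySem.Set Int × List Int) i =>
      if PySem.Set.contains sc.1 (PySem.List.pyGetD arr i 0) then sc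
      else (PySem.Set.add sc.1 (PySem.List.pyGetD arr i 0),
            sc.2 ++ [PySem.List.pyGetD arr i 0]))
    (PySem.Set.empty, [])
  PySem.List.pyGetD st.2 (-1) 0

-- ===== PORT B =====
def lseGo (arr : List Int) : List (Int × Int) → Int
  | [] => 0    -- Python falls off the loop and returns None; unreachable under Pre_
  | (i, x) :: rest =>
      if x ∈ PySem.List.slice arr (some (i + 1)) none then lseGo arr rest else x

def lastSeenElement_alt (arr : List Int) : Int :=
  lseGo arr (PySem.List.enumerate arr 0)

-- ===== PRECONDITION & SPEC =====
-- A's final negative indexing into c raises IndexError on the empty list (B's loop returns no value there).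
def Pre_lastSeenElement (arr : List Int) : Prop := arr ≠ []
instance (arr : List Int) : Decidable (Pre_lastSeenElement arr) := by
  unfold Pre_lastSeenElement; infer_instance

def pvWitness_lastSeenElement : List Int := [1, 2, 1]

def Spec_lastSeenElement (arr : List Int) (out : Int) : Prop := out = lastSeenElement_alt arr
instance (arr : List Int) (out : Int) : Decidable (Spec_lastSeenElement arr out) := by unfold Spec_lastSeenElement; infer_instance

-- ===== CLAIM (what is proved, stated in full; the proofs are below) =====
def Claim_equal_lastSeenElement : Prop := ∀ (arr : List Int), Dom_lastSeenElement arr → Pre_lastSeenElement arr → Spec_lastSeenElement arr (lastSeenElement arr)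

-- ===== LEMMAS AND PROOFS =====

-- common specification: the first element (scanning forward) that does not occur again
def fuSpec : List Int → Int
  | [] => 0
  | x :: xs => if x ∈ xs then fuSpec xs else x

-- A's loop re-indexed over (List.range arr.length).reverse
def gA (arr : List Int) : PySem.Set Int × List Int :=
  (List.range arr.length).reverse.foldl
    (fun sc k =>
      if PySem.Set.contains sc.1 (arr.getD k 0) then sc
      else (PySem.Set.add sc.1 (arr.getD k 0), sc.2 ++ [arr.getD k 0]))
    (PySem.Set.empty, [])

lemma A_eq_gA (arr : List Int) :
    lastSeenElement arr = PySem.List.pyGetD (gA arr).2 (-1) 0 := by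
  unfold lastSeenElement gA
  rw [PySem.List.pyRange_neg_one_eq_reverse]
  simp only [neg_add_cancel, sub_add_cancel, PySem.List.pyRange_one, sub_zero, Int.toNat_natCast,
    zero_add, ← List.map_reverse, List.foldl_map, PySem.List.pyGetD_natCast]

lemma gA_cons (x : Int) (xs : List Int) :
    gA (x :: xs) =
      (if PySem.Set.contains (gA xs).1 x then gA xs
       else (PySem.Set.add (gA xs).1 x, (gA xs).2 ++ [x])) := by
  unfold gA
  rw [List.length_cons, List.range_succ_eq_map, List.reverse_cons, List.foldl_append,
    ← List.map_reverse, List.foldl_map]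
  simp only [List.getD_cons_succ, List.getD_cons_zero, List.foldl_cons, List.foldl_nil]

lemma gA_main : ∀ xs : List Int,
    (∀ v : Int, v ∈ (gA xs).1 ↔ v ∈ xs) ∧
      (xs ≠ [] → PySem.List.pyGetD (gA xs).2 (-1) 0 = fuSpec xs) := by
  intro xs
  induction xs with
  | nil => simp [gA, PySem.Set.empty]
  | cons x t ih =>
    rw [gA_cons]
    by_cases hx : x ∈ (gA t).1
    · have hc : PySem.Set.contains (gA t).1 x = true := (PySem.Set.contains_iff _ _).mpr hx
      have hxt : x ∈ t := (ih.1 x).mp hx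
      have ht : t ≠ [] := by rintro rfl; simp at hxt
      refine ⟨?_, ?_⟩
      · intro v; simp only [hc, if_pos]
        rw [ih.1 v, List.mem_cons]
        constructor
        · exact Or.inr
        · rintro (rfl | h); exact hxt; exact h
      · intro _
        simp only [hc, if_pos]
        rw [ih.2 ht]
        simp [fuSpec, hxt]
    · have hc : PySem.Set.contains (gA t).1 x = false := by
        by_contra h
        exact hx ((PySem.Set.contains_iff _ _).mp (by simpa using h))
      have hxt : x ∉ t := fun h => hx ((ih.1 x).mpr h)
      refine ⟨?_, ?_⟩
      · intro v; simp only [hc, if_neg, Bool.false_eq_true, not_false_iff]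
        rw [PySem.Set.mem_add _ _ _, ih.1 v, List.mem_cons]
        tauto
      · intro _
        simp only [hc, Bool.false_eq_true, if_neg, not_false_iff]
        rw [PySem.List.pyGetD_neg_one_append_singleton]
        simp [fuSpec, hxt]

lemma lseGo_spec : ∀ (xs : List Int) (k : Nat) (arr : List Int),
    arr.drop k = xs → lseGo arr (PySem.List.enumerate xs (k : Int)) = fuSpec xs := by
  intro xs
  induction xs with
  | nil => intro k arr _; simp [PySem.List.enumerate_nil, lseGo, fuSpec]
  | cons x t ih =>
    intro k arr hdrop
    rw [PySem.List.enumerate_cons]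
    have hk1 : ((k : Int) + 1) = ((k + 1 : Nat) : Int) := by push_cast; ring
    have hdrop1 : arr.drop (k + 1) = t := by
      have : arr.drop (k + 1) = (arr.drop k).drop 1 := by
        rw [List.drop_drop]
      rw [this, hdrop]; rfl
    show (if x ∈ PySem.List.slice arr (some ((k : Int) + 1)) none then
            lseGo arr (PySem.List.enumerate t ((k : Int) + 1)) else x) = fuSpec (x :: t)
    rw [hk1, PySem.List.slice_from_natCast, hdrop1, ih (k + 1) arr hdrop1]
    simp only [fuSpec]

-- ===== VERDICT (by name: the statement is the Claim_ definition above) =====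
theorem lastSeenElement_spec : Claim_equal_lastSeenElement := by
  intro arr _ hpre
  unfold Spec_lastSeenElement lastSeenElement_alt
  rw [A_eq_gA, (gA_main arr).2 hpre]
  have := lseGo_spec arr 0 arr (by simp)
  simpa using this.symm
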